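-- pv_equiv track=rewrite | github.com/ramge132/SSAFY_Daejeon_Algorithm | ramge132/BOJ/BOJ_B1_부녀회장이될테야.py | calculate
-- ===== SOURCE A (Python) =====
-- def calculate(k, n):
--     # 15x15 배열로 초기화 (0층부터 14층까지, 1호부터 14호까지)
--     residents = [[0] * (n + 1) for _ in range(k + 1)]
--
--     # 0층 초기화
--     for i in range(1, n + 1):
--         residents[0][i] = i
--
--     # DP 계산
--     for i in range(1, k + 1):
--         for j in range(1, n + 1):
--             residents[i][j] = residents[i][j-1] + residents[i-1][j]
--
--     return residents[k][n]
-- ===== SOURCE B (Python) =====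
-- def calculate(k, n):
--     # closed form: residents[k][n] = C(n+k, k+1), computed as an exact rising product
--     r = 1
--     for i in range(1, k + 2):
--         r = r * (n - 1 + i) // i
--     return r
-- ===== Notes on version B (the rewrite author's own statement) =====
-- stated objective: faster
-- what changed: replaces the O(k*n) two-dimensional DP table with the closed-form binomial coefficient C(n+k, k+1), computed as an exact O(k) rising product with integer division
import Mathlib
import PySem

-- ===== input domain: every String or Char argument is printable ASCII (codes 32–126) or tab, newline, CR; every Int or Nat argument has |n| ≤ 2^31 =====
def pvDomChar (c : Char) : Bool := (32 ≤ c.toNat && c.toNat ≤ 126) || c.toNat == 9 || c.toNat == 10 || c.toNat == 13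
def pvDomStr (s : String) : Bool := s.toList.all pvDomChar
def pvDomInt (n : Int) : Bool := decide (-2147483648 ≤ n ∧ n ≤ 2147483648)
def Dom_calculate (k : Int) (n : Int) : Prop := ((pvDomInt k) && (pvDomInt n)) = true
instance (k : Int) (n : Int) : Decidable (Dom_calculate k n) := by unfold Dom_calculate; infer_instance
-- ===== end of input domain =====

-- B replaces A's O(k*n) DP table by the closed-form binomial C(n+k, k+1) as an exact O(k) rising product (objective: faster).

-- ===== PORT A =====
-- residents[i][j] reads/writes, ported with PySem list indexing (Pre_ keeps them in range)
def pvGet (m : List (List Int)) (i j : Int) : Int :=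
  PySem.List.pyGetD (PySem.List.pyGetD m i []) j 0

def pvSet (m : List (List Int)) (i j v : Int) : List (List Int) :=
  PySem.List.pySetD m i (PySem.List.pySetD (PySem.List.pyGetD m i []) j v)

def calculate (k : Int) (n : Int) : Int :=
  -- residents = [[0] * (n + 1) for _ in range(k + 1)]
  let residents := (PySem.List.pyRange 0 (k+1) 1).map (fun _ => List.replicate (n+1).toNat 0)
  -- for i in range(1, n + 1): residents[0][i] = i
  let residents := (PySem.List.pyRange 1 (n+1) 1).foldl (fun r i => pvSet r 0 i i) residents
  -- for i in range(1, k + 1): for j in range(1, n + 1): residents[i][j] = residents[i][j-1] + residents[i-1][j]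
  let residents := (PySem.List.pyRange 1 (k+1) 1).foldl (fun r i =>
      (PySem.List.pyRange 1 (n+1) 1).foldl (fun r j =>
        pvSet r i j (pvGet r i (j-1) + pvGet r (i-1) j)) r) residents
  pvGet residents k n

-- ===== PORT B =====
def calculate_alt (k : Int) (n : Int) : Int :=
  (PySem.List.pyRange 1 (k+2) 1).foldl (fun r i => PySem.Int.floordiv (r * (n - 1 + i)) i) 1

-- ===== PRECONDITION & SPEC =====
-- A raises IndexError whenever k < 0 or n < 0 (empty table or out-of-range row/column index)
def Pre_calculate (k : Int) (n : Int) : Prop := 0 ≤ k ∧ 0 ≤ n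
instance (k : Int) (n : Int) : Decidable (Pre_calculate k n) := by unfold Pre_calculate; infer_instance
def pvWitness_calculate : Int × Int := (2, 3)

def Spec_calculate (k : Int) (n : Int) (out : Int) : Prop := out = calculate_alt k n
instance (k : Int) (n : Int) (out : Int) : Decidable (Spec_calculate k n out) := by unfold Spec_calculate; infer_instance

-- ===== CLAIM (what is proved, stated in full; the proofs are below) =====
def Claim_equal_calculate : Prop := ∀ (k : Int) (n : Int), Dom_calculate k n → Pre_calculate k n → Spec_calculate k n (calculate k n)

-- ===== LEMMAS AND PROOFS =====

-- functional model of the 2D array, used only in the proofs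
def pvUpd (r : Int → Int → Int) (i j v : Int) : Int → Int → Int :=
  fun a b => if a = i ∧ b = j then v else r a b

-- the list matrix generated by a function
def pvMk (k n : Int) (f : Int → Int → Int) : List (List Int) :=
  (PySem.List.pyRange 0 (k+1) 1).map (fun a => (PySem.List.pyRange 0 (n+1) 1).map (f a))

lemma pv_set_map_pyRange {α : Type} (N : Int) (g : Int → α) (i : Int) (v : α)
    (h0 : 0 ≤ i) (h1 : i < N) :
    PySem.List.pySetD ((PySem.List.pyRange 0 N 1).map g) i v
      = (PySem.List.pyRange 0 N 1).map (fun a => if a = i then v else g a) := by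
  rw [PySem.List.pySetD_of_nonneg _ _ h0]
  apply List.ext_getElem
  · simp
  · intro p hp1 hp2
    simp only [List.getElem_set, List.getElem_map] at *
    rw [PySem.List.getElem_pyRange_one]
    split_ifs <;> simp_all <;> omega

lemma pv_get_Mk (k n : Int) (f : Int → Int → Int) (i j : Int)
    (hi : 0 ≤ i ∧ i < k+1) (hj : 0 ≤ j ∧ j < n+1) :
    pvGet (pvMk k n f) i j = f i j := by
  unfold pvGet pvMk
  rw [PySem.List.pyGetD_map_pyRange_of_nonneg _ _ _ _ hi.1 hi.2,
      PySem.List.pyGetD_map_pyRange_of_nonneg _ _ _ _ hj.1 hj.2]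

lemma pv_set_Mk (k n : Int) (f : Int → Int → Int) (i j v : Int)
    (hi : 0 ≤ i ∧ i < k+1) (hj : 0 ≤ j ∧ j < n+1) :
    pvSet (pvMk k n f) i j v = pvMk k n (pvUpd f i j v) := by
  unfold pvSet pvMk
  rw [PySem.List.pyGetD_map_pyRange_of_nonneg _ _ _ _ hi.1 hi.2,
      pv_set_map_pyRange _ _ _ _ hj.1 hj.2,
      pv_set_map_pyRange _ _ _ _ hi.1 hi.2]
  apply List.map_congr_left
  intro a _
  by_cases hai : a = i
  · subst hai
    simp only [if_pos rfl]
    apply List.map_congr_left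
    intro b _
    simp only [pvUpd]
    split_ifs <;> simp_all
  · rw [if_neg hai]
    apply List.map_congr_left
    intro b _
    simp only [pvUpd]
    split_ifs <;> simp_all

lemma pv_row0_list (k n : Int) (hk : 0 ≤ k) (l : List Int)
    (hl : ∀ x ∈ l, 0 ≤ x ∧ x < n+1) (f : Int → Int → Int) :
    l.foldl (fun r i => pvSet r 0 i i) (pvMk k n f)
      = pvMk k n (l.foldl (fun g i => pvUpd g 0 i i) f) := by
  induction l generalizing f with
  | nil => rfl
  | cons x xs ih =>
    simp only [List.foldl]
    rw [pv_set_Mk k n f 0 x x ⟨le_rfl, by omega⟩ (hl x List.mem_cons_self)]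
    exact ih (fun y hy => hl y (List.mem_cons_of_mem _ hy)) _

lemma pv_inner_list (k n : Int) (i : Int) (hi : 0 ≤ i ∧ i < k+1) (hi1 : 1 ≤ i)
    (l : List Int) (hl : ∀ x ∈ l, 1 ≤ x ∧ x < n+1) (f : Int → Int → Int) :
    l.foldl (fun r j => pvSet r i j (pvGet r i (j-1) + pvGet r (i-1) j)) (pvMk k n f)
      = pvMk k n (l.foldl (fun g j => pvUpd g i j (g i (j-1) + g (i-1) j)) f) := by
  induction l generalizing f with
  | nil => rfl
  | cons x xs ih =>
    simp only [List.foldl]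
    have hx := hl x List.mem_cons_self
    rw [pv_get_Mk k n f i (x-1) hi ⟨by omega, by omega⟩,
        pv_get_Mk k n f (i-1) x ⟨by omega, by omega⟩ ⟨by omega, by omega⟩,
        pv_set_Mk k n f i x _ hi ⟨by omega, by omega⟩]
    exact ih (fun y hy => hl y (List.mem_cons_of_mem _ hy)) _

lemma pv_outer_list (k n : Int) (l : List Int) (hl : ∀ x ∈ l, 1 ≤ x ∧ x < k+1)
    (f : Int → Int → Int) :
    l.foldl (fun r i =>
        (PySem.List.pyRange 1 (n+1) 1).foldl (fun r j =>
          pvSet r i j (pvGet r i (j-1) + pvGet r (i-1) j)) r) (pvMk k n f)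
      = pvMk k n (l.foldl (fun g i =>
          (PySem.List.pyRange 1 (n+1) 1).foldl (fun g j =>
            pvUpd g i j (g i (j-1) + g (i-1) j)) g) f) := by
  induction l generalizing f with
  | nil => rfl
  | cons x xs ih =>
    simp only [List.foldl]
    have hx := hl x List.mem_cons_self
    rw [pv_inner_list k n x ⟨by omega, by omega⟩ (by omega) _
          (fun y hy => (PySem.List.mem_pyRange_one.mp hy).imp id (by omega)) f]
    exact ih (fun y hy => hl y (List.mem_cons_of_mem _ hy)) _

-- the DP value: residents[a][b] = C(a+b, a+1)
def pvC (a b : Nat) : Int := ((a + b).choose (a + 1) : Int)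

-- the matrix after the row-0 loop and outer rows 1..t have been processed (n = last column)
def pvMat (n : Int) (t : Nat) : Int → Int → Int :=
  fun a b => if 1 ≤ b ∧ b ≤ n ∧ 0 ≤ a ∧ a ≤ (t : Int) then pvC a.toNat b.toNat else 0

-- B's loop computes choose(n+M, M+1) by an exact rising product
lemma pv_alt_loop (n : Int) (hn : 0 ≤ n) (M : Nat) :
    (PySem.List.pyRange 1 ((M : Int) + 2) 1).foldl
      (fun r i => PySem.Int.floordiv (r * (n - 1 + i)) i) 1
      = ((n.toNat + M).choose (M + 1) : Int) := by
  induction M with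
  | zero =>
    have h2 : ((0:Nat):Int) + 2 = 1 + 1 := by norm_num
    rw [h2, PySem.List.pyRange_one_singleton]
    simp [List.foldl]
    omega
  | succ M ih =>
    have hsplit : PySem.List.pyRange 1 (((M+1:Nat):Int) + 2) 1
        = PySem.List.pyRange 1 ((M:Int) + 2) 1 ++ [(M:Int)+2] := by
      have : (((M+1:Nat):Int) + 2) = ((M:Int)+2) + 1 := by push_cast; ring
      rw [this, PySem.List.pyRange_one_succ_right (by omega)]
    rw [hsplit, List.foldl_append, ih]
    simp only [List.foldl]
    have hval : n - 1 + ((M:Int) + 2) = ((n.toNat + M + 1 : Nat) : Int) := by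
      push_cast; omega
    rw [hval]
    have hid : (n.toNat + M).choose (M + 1) * (n.toNat + M + 1)
        = (n.toNat + M + 1).choose (M + 2) * (M + 2) := by
      have h := Nat.add_one_mul_choose_eq (n.toNat + M) (M + 1)
      rw [mul_comm]
      convert h using 2 <;> omega
    have hcast : ((n.toNat + M).choose (M + 1) : Int) * ((n.toNat + M + 1 : Nat) : Int)
        = (((n.toNat + M + 1).choose (M + 2) * (M + 2) : Nat) : Int) := by
      push_cast [← hid]; ring
    rw [hcast]
    have hM2 : ((M:Int) + 2) = ((M + 2 : Nat) : Int) := by push_cast; ring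
    rw [hM2, PySem.Int.floordiv_natCast]
    rw [Nat.mul_div_cancel _ (by omega : 0 < M + 2)]
    congr 2 <;> omega

-- row-0 loop, generalized over the upper bound
lemma pv_row0_aux (m : Nat) :
    (PySem.List.pyRange 1 ((m : Int) + 1) 1).foldl (fun r i => pvUpd r 0 i i) (fun _ _ => 0)
      = fun a b => if a = 0 ∧ 1 ≤ b ∧ b ≤ (m : Int) then b else 0 := by
  induction m with
  | zero =>
    rw [show ((0:Nat):Int) + 1 = 1 by norm_num, PySem.List.pyRange_one_eq_nil le_rfl]
    funext a b
    simp only [List.foldl]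
    split_ifs with h
    · omega
    · rfl
  | succ m ih =>
    rw [show (((m+1:Nat)):Int) + 1 = ((m:Int)+1) + 1 by push_cast; ring,
        PySem.List.pyRange_one_succ_right (by omega), List.foldl_append, ih]
    funext a b
    simp only [List.foldl, pvUpd]
    split_ifs with h1 h2 h3 <;> push_cast <;> omega

-- the row-0 loop produces pvMat n 0
lemma pv_row0 (n : Int) (hn : 0 ≤ n) :
    (PySem.List.pyRange 1 (n+1) 1).foldl (fun r i => pvUpd r 0 i i) (fun _ _ => 0)
      = pvMat n 0 := by
  have h := pv_row0_aux n.toNat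
  rw [Int.toNat_of_nonneg hn] at h
  rw [h]
  funext a b
  simp only [pvMat]
  split_ifs with h1 h2 h3
  · simp only [pvC]
    rw [h1.1]
    simp only [Int.toNat_zero, Nat.zero_add, Nat.choose_one_right]
    omega
  · omega
  · omega
  · rfl

-- Pascal's rule specialized to pvC
lemma pvC_pascal (t m : Nat) : pvC (t+1) m + pvC t (m+1) = pvC (t+1) (m+1) := by
  simp only [pvC]
  have h := Nat.choose_succ_succ' (t + m + 1) (t + 1)
  rw [show t+1+(m+1) = t+m+1+1 by ring, show t+1+1 = (t+1)+1 by ring]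
  rw [show t+1+m = t+m+1 by ring, show t+(m+1) = t+m+1 by ring]
  push_cast [h]
  ring

-- the inner loop on row t+1, generalized over how many columns are done
lemma pv_inner_aux (n : Int) (t : Nat) (m : Nat) (hm : (m:Int) ≤ n) :
    (PySem.List.pyRange 1 ((m:Int)+1) 1).foldl
      (fun r j => pvUpd r ((t : Int)+1) j (r ((t : Int)+1) (j-1) + r ((t : Int)+1-1) j))
      (pvMat n t)
    = fun a b => if a = (t:Int)+1 ∧ 1 ≤ b ∧ b ≤ (m:Int) then pvC (t+1) b.toNat else pvMat n t a b := by
  induction m with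
  | zero =>
    rw [show ((0:Nat):Int) + 1 = 1 by norm_num, PySem.List.pyRange_one_eq_nil le_rfl]
    funext a b
    simp only [List.foldl]
    split_ifs with h
    · omega
    · rfl
  | succ m ih =>
    have ih' := ih (by push_cast at hm ⊢; omega)
    rw [show (((m+1:Nat)):Int) + 1 = ((m:Int)+1) + 1 by push_cast; ring,
        PySem.List.pyRange_one_succ_right (by omega), List.foldl_append, ih']
    simp only [List.foldl]
    funext a b
    simp only [pvUpd]
    by_cases hab : a = (t:Int)+1 ∧ b = (m:Int)+1
    · rw [if_pos hab]
      rw [if_neg (by omega : ¬((t:Int)+1-1 = (t:Int)+1 ∧ 1 ≤ (m:Int)+1 ∧ (m:Int)+1 ≤ (m:Int)))]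
      simp only [pvMat]
      rw [if_pos (by push_cast at hm; omega :
            1 ≤ (m:Int)+1 ∧ (m:Int)+1 ≤ n ∧ 0 ≤ (t:Int)+1-1 ∧ (t:Int)+1-1 ≤ (t:Int))]
      rw [if_pos (by omega : a = (t:Int)+1 ∧ 1 ≤ b ∧ b ≤ ((m+1:Nat):Int))]
      by_cases hm0 : m = 0
      · subst hm0
        rw [if_neg (by norm_num : ¬(True ∧ 1 ≤ ((0:Nat):Int)+1-1 ∧ ((0:Nat):Int)+1-1 ≤ ((0:Nat):Int)))]
        rw [if_neg (by omega : ¬(1 ≤ ((0:Nat):Int)+1-1 ∧ ((0:Nat):Int)+1-1 ≤ n ∧ 0 ≤ (t:Int)+1 ∧ (t:Int)+1 ≤ (t:Int)))]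
        rw [show ((t:Int)+1-1).toNat = t from by omega, show (((0:Nat):Int)+1).toNat = 1 from by omega,
            show b.toNat = 1 from by omega]
        have h := pvC_pascal t 0
        simpa [pvC, Nat.choose_eq_zero_of_lt] using h.symm
      · rw [if_pos (⟨trivial, by omega, by omega⟩ : True ∧ 1 ≤ (m:Int)+1-1 ∧ (m:Int)+1-1 ≤ (m:Int))]
        rw [show ((m:Int)+1-1).toNat = m from by omega, show ((t:Int)+1-1).toNat = t from by omega,
            show ((m:Int)+1).toNat = m+1 from by omega, show b.toNat = m+1 from by omega]
        exact pvC_pascal t m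
    · rw [if_neg hab]
      simp only [pvMat]
      split_ifs <;> first | rfl | omega | (congr 1 <;> omega)

-- the inner loop over the full row turns pvMat n t into pvMat n (t+1)
lemma pv_inner (n : Int) (hn : 0 ≤ n) (t : Nat) :
    (PySem.List.pyRange 1 (n+1) 1).foldl
      (fun r j => pvUpd r ((t : Int)+1) j (r ((t : Int)+1) (j-1) + r ((t : Int)+1-1) j))
      (pvMat n t)
      = pvMat n (t+1) := by
  have h := pv_inner_aux n t n.toNat (by omega)
  rw [show ((n.toNat : Int)) + 1 = n + 1 from by omega] at h
  rw [h]
  funext a b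
  simp only [pvMat]
  split_ifs <;> first | rfl | omega | (congr 1 <;> omega)

-- the outer loop
lemma pv_outer (n : Int) (hn : 0 ≤ n) (t : Nat) :
    (PySem.List.pyRange 1 ((t : Int)+1) 1).foldl (fun r i =>
      (PySem.List.pyRange 1 (n+1) 1).foldl (fun r j =>
        pvUpd r i j (r i (j-1) + r (i-1) j)) r) (pvMat n 0)
      = pvMat n t := by
  induction t with
  | zero =>
    rw [show ((0:Nat):Int) + 1 = 1 by norm_num, PySem.List.pyRange_one_eq_nil le_rfl]
    rfl
  | succ t ih =>
    rw [show (((t+1:Nat)):Int) + 1 = ((t:Int)+1) + 1 by push_cast; ring,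
        show PySem.List.pyRange 1 (((t:Int)+1)+1) 1
            = PySem.List.pyRange 1 ((t:Int)+1) 1 ++ [(t:Int)+1]
          from PySem.List.pyRange_one_succ_right (by omega),
        List.foldl_append, ih]
    simpa using pv_inner n hn t

-- A's result in closed form
lemma pv_A_closed (k n : Int) (hk : 0 ≤ k) (hn : 0 ≤ n) :
    calculate k n = ((n.toNat + k.toNat).choose (k.toNat + 1) : Int) := by
  obtain ⟨K, rfl⟩ : ∃ K : Nat, k = (K : Int) := ⟨k.toNat, by omega⟩
  show pvGet _ _ _ = _

  have hinit : (PySem.List.pyRange 0 ((K:Int)+1) 1).map (fun _ => List.replicate (n+1).toNat (0:Int))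
      = pvMk (K:Int) n (fun _ _ => 0) := by
    unfold pvMk
    apply List.map_congr_left
    intro a _
    rw [List.map_const', PySem.List.length_pyRange_one]
    norm_num
  rw [hinit,
      pv_row0_list (K:Int) n (by omega) _
        (fun y hy => (PySem.List.mem_pyRange_one.mp hy).imp (by omega) id) _,
      pv_row0 n hn,
      pv_outer_list (K:Int) n _
        (fun y hy => (PySem.List.mem_pyRange_one.mp hy).imp id id) _,
      pv_outer n hn K,
      pv_get_Mk (K:Int) n _ _ _ ⟨hk, by omega⟩ ⟨hn, by omega⟩]
  simp only [pvMat]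
  split_ifs with h
  · simp only [pvC]
    congr 2 <;> omega
  · have hn0 : n = 0 := by omega
    subst hn0
    simp [Nat.choose_eq_zero_of_lt]

-- ===== VERDICT (by name: the statement is the Claim_ definition above) =====
theorem calculate_spec : Claim_equal_calculate := by
  intro k n _ hpre
  obtain ⟨hk, hn⟩ := hpre
  show calculate k n = calculate_alt k n
  have hB : calculate_alt k n = ((n.toNat + k.toNat).choose (k.toNat + 1) : Int) := by
    have h := pv_alt_loop n hn k.toNat
    rw [show ((k.toNat : Int)) + 2 = k + 2 from by omega] at h
    exact h
  rw [pv_A_closed k n hk hn, hB]
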